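-- pv_equiv track=rewrite | github.com/PeterMangoro/GymTrackerStreamlit | utils/data_processing.py | get_max_weight_and_reps
-- ===== SOURCE A (Python) =====
-- def get_max_weight_and_reps(sets_data):
--     """Get the maximum weight lifted and corresponding reps"""
--     if not sets_data:
--         return 0, 0
--
--     max_weight = 0
--     max_reps_at_max_weight = 0
--
--     for set_data in sets_data:
--         if set_data['weight'] > max_weight:
--             max_weight = set_data['weight']
--             max_reps_at_max_weight = set_data['reps']
--         elif set_data['weight'] == max_weight:
--             max_reps_at_max_weight = max(max_reps_at_max_weight, set_data['reps'])
--
--     return max_weight, max_reps_at_max_weight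
-- ===== SOURCE B (Python) =====
-- def get_max_weight_and_reps(sets_data):
--     """Get the maximum weight lifted and corresponding reps"""
--     if not sets_data:
--         return 0, 0
--     candidates = [(s['weight'], s['reps']) for s in sets_data] + [(0, 0)]
--     max_weight = max(w for w, _ in candidates)
--     reps = max(r for w, r in candidates if w == max_weight)
--     return max_weight, reps
-- ===== Notes on version B (the rewrite author's own statement) =====
-- stated objective: simpler
-- what changed: Replaces A's single accumulator loop with three branches by staged passes over an explicit candidate list (the sets' (weight, reps) pairs plus a baseline (0, 0) entry): one pass takes the maximum weight, a second filtered pass takes the maximum reps at that weight.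
-- outside the precondition, e.g. on get_max_weight_and_reps([{'weight': -1}]): A returns (0, 0), B raises KeyError
import Mathlib
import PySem

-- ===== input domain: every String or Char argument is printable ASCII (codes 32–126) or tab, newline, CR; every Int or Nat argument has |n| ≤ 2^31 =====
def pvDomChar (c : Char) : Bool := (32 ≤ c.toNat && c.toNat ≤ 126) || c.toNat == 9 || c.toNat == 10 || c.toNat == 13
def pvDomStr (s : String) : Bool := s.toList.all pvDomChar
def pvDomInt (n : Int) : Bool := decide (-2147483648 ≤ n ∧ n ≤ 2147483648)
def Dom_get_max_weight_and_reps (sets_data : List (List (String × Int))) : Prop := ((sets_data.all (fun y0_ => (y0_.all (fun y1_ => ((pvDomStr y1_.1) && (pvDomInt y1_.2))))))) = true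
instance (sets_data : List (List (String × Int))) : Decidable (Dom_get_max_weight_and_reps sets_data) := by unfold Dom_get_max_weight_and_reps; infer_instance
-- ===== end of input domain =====

-- B replaces A's three-branch running-max loop by staged passes over an explicit candidate list
-- (mapped (weight, reps) pairs plus a baseline (0, 0)): max weight first, then max reps at that
-- weight; objective: simpler. Equivalence proved on inputs where every set has both keys
-- (elsewhere Python A or B raises KeyError).


-- ===== PORT A =====
-- dict access s['weight'] → first-match association-list lookup; Pre_ guarantees the key is
-- present, so .getD 0 is never the default (Python would raise KeyError, excluded by Pre_).
def get_max_weight_and_reps (sets_data : List (List (String × Int))) : Int × Int :=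
  if sets_data = [] then (0, 0)
  else
    sets_data.foldl
      (fun acc set_data =>
        let w := (set_data.lookup "weight").getD 0
        if w > acc.1 then (w, (set_data.lookup "reps").getD 0)
        else if w = acc.1 then (acc.1, max acc.2 ((set_data.lookup "reps").getD 0))
        else acc)
      (0, 0)

-- ===== PORT B =====
-- builds the candidate list (mapped pairs ++ [(0,0)]), then Python's max(no key) twice:
-- PySem.List.max? with identity key; the lists are nonempty so .getD 0 is never the default.
def get_max_weight_and_reps_alt (sets_data : List (List (String × Int))) : Int × Int :=
  if sets_data = [] then (0, 0)
  else
    let candidates :=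
      (sets_data.map (fun s => ((s.lookup "weight").getD 0, (s.lookup "reps").getD 0)))
        ++ [((0 : Int), (0 : Int))]
    let max_weight := (PySem.List.max? (candidates.map Prod.fst) (fun y => y)).getD 0
    let reps :=
      (PySem.List.max? ((candidates.filter (fun p => p.1 = max_weight)).map Prod.snd)
        (fun y => y)).getD 0
    (max_weight, reps)

-- ===== PRECONDITION & SPEC =====
-- Pre_ excludes inputs where some set lacks the 'weight' or 'reps' key: A raises KeyError on a
-- missing 'weight' or a 'reps' read its loop reaches, and B itself raises KeyError on any
-- missing key while building the candidate pairs, so those inputs are excluded.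
def Pre_get_max_weight_and_reps (sets_data : List (List (String × Int))) : Prop :=
  ∀ s ∈ sets_data, (s.lookup "weight").isSome ∧ (s.lookup "reps").isSome
instance (sets_data : List (List (String × Int))) : Decidable (Pre_get_max_weight_and_reps sets_data) := by unfold Pre_get_max_weight_and_reps; infer_instance

def pvWitness_get_max_weight_and_reps : (List (List (String × Int))) :=
  [[("weight", 100), ("reps", 5)], [("weight", 100), ("reps", 8)], [("weight", 60), ("reps", 12)]]

def Spec_get_max_weight_and_reps (sets_data : List (List (String × Int))) (out : Int × Int) : Prop := out = get_max_weight_and_reps_alt sets_data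
instance (sets_data : List (List (String × Int))) (out : Int × Int) : Decidable (Spec_get_max_weight_and_reps sets_data out) := by unfold Spec_get_max_weight_and_reps; infer_instance

-- ===== CLAIM (what is proved, stated in full; the proofs are below) =====
def Claim_equal_get_max_weight_and_reps : Prop := ∀ (sets_data : List (List (String × Int))), Dom_get_max_weight_and_reps sets_data → Pre_get_max_weight_and_reps sets_data → Spec_get_max_weight_and_reps sets_data (get_max_weight_and_reps sets_data)

-- ===== LEMMAS AND PROOFS =====

-- A's fold: the result is an element of init :: xs (as a value), dominates every first
-- component, and dominates every second component among entries reaching the max weight.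
def pvStepA (acc : Int × Int) (p : Int × Int) : Int × Int :=
  if p.1 > acc.1 then p
  else if p.1 = acc.1 then (acc.1, max acc.2 p.2)
  else acc

theorem pvStepA_facts (m q : Int × Int) :
    (pvStepA m q = m ∨ pvStepA m q = q) ∧
      m.1 ≤ (pvStepA m q).1 ∧ q.1 ≤ (pvStepA m q).1 ∧
      (m.1 = (pvStepA m q).1 → m.2 ≤ (pvStepA m q).2) ∧
      (q.1 = (pvStepA m q).1 → q.2 ≤ (pvStepA m q).2) := by
  unfold pvStepA
  split_ifs with h1 h2
  · exact ⟨Or.inr rfl, le_of_lt h1, le_refl _, fun e => absurd e (by omega), fun _ => le_refl _⟩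
  · by_cases h3 : q.2 ≤ m.2
    · refine ⟨Or.inl (by rw [max_eq_left h3]), le_refl _, le_of_eq h2, fun _ => ?_, fun _ => ?_⟩
      · simp [max_eq_left h3]
      · simp [h3]
    · have h3' : m.2 ≤ q.2 := by omega
      refine ⟨Or.inr (by rw [max_eq_right h3']; exact Prod.ext h2.symm rfl),
        le_refl _, le_of_eq h2, fun _ => ?_, fun _ => ?_⟩
      · simp [h3']
      · simp [max_eq_right h3']
  · exact ⟨Or.inl rfl, le_refl _, by omega, fun _ => le_refl _, fun e => absurd e (by omega)⟩

theorem pvFoldA_inv (xs : List (Int × Int)) (m : Int × Int) :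
    (xs.foldl pvStepA m) ∈ m :: xs ∧
      ∀ p ∈ m :: xs, p.1 ≤ (xs.foldl pvStepA m).1 ∧
        (p.1 = (xs.foldl pvStepA m).1 → p.2 ≤ (xs.foldl pvStepA m).2) := by
  induction xs generalizing m with
  | nil =>
    refine ⟨List.mem_singleton.mpr rfl, ?_⟩
    intro p hp
    rw [List.mem_singleton] at hp
    subst hp
    exact ⟨le_refl _, fun _ => le_refl _⟩
  | cons q t ih =>
    obtain ⟨hs_or, hm1, hq1, hm2, hq2⟩ := pvStepA_facts m q
    obtain ⟨ihmem, ihdom⟩ := ih (pvStepA m q)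
    simp only [List.foldl_cons]
    set r := t.foldl pvStepA (pvStepA m q) with hr
    obtain ⟨hs1, hs2⟩ := ihdom (pvStepA m q) (List.mem_cons_self ..)
    constructor
    · rcases List.mem_cons.mp ihmem with h | h
      · rcases hs_or with e | e <;> rw [h, e] <;> simp
      · exact List.mem_cons.mpr (Or.inr (List.mem_cons.mpr (Or.inr h)))
    · intro p hp
      rcases List.mem_cons.mp hp with e | hp'
      · subst e
        refine ⟨le_trans hm1 hs1, fun e => ?_⟩
        have e1 : p.1 = (pvStepA p q).1 := by omega
        have e2 : (pvStepA p q).1 = r.1 := by omega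
        exact le_trans (hm2 e1) (hs2 e2)
      rcases List.mem_cons.mp hp' with e | hp''
      · subst e
        refine ⟨le_trans hq1 hs1, fun e => ?_⟩
        have e1 : p.1 = (pvStepA m p).1 := by omega
        have e2 : (pvStepA m p).1 = r.1 := by omega
        exact le_trans (hq2 e1) (hs2 e2)
      · exact ihdom p (List.mem_cons.mpr (Or.inr hp''))

-- ===== VERDICT (by name: the statement is the Claim_ definition above) =====
-- Python's max with no key on a nonempty list returns THE maximum value: first-extremal with
-- identity key, pinned by antisymmetry from max?_mem / max?_isMax.
theorem pv_max?_eq (l : List Int) (a : Int) (ha : a ∈ l) (hd : ∀ y ∈ l, y ≤ a) :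
    PySem.List.max? l (fun y => y) = some a := by
  cases h : PySem.List.max? l (fun y => y) with
  | none =>
    rw [PySem.List.max?_eq_none_iff] at h
    subst h; cases ha
  | some w =>
    have hw := PySem.List.max?_mem h
    have hmax := PySem.List.max?_isMax h
    have : w = a := le_antisymm (hd w hw) (hmax a ha)
    rw [this]

theorem get_max_weight_and_reps_spec : Claim_equal_get_max_weight_and_reps := by
  intro sets_data _ _
  unfold Spec_get_max_weight_and_reps get_max_weight_and_reps get_max_weight_and_reps_alt
  by_cases hnil : sets_data = []
  · subst hnil; rfl
  simp only [hnil, if_false]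
  set g : List (String × Int) → Int × Int :=
    fun s => ((s.lookup "weight").getD 0, (s.lookup "reps").getD 0) with hg
  have hfold : sets_data.foldl
      (fun acc set_data =>
        let w := (set_data.lookup "weight").getD 0
        if w > acc.1 then (w, (set_data.lookup "reps").getD 0)
        else if w = acc.1 then (acc.1, max acc.2 ((set_data.lookup "reps").getD 0))
        else acc) ((0 : Int), (0 : Int))
      = (sets_data.map g).foldl pvStepA (0, 0) := by
    rw [List.foldl_map]
    rfl
  rw [hfold]
  set xs := sets_data.map g with hxs
  set r := xs.foldl pvStepA (0, 0) with hrdef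
  obtain ⟨hmem, hdom⟩ := pvFoldA_inv xs (0, 0)
  rw [← hrdef] at hmem hdom
  have hmemc : r ∈ xs ++ [((0 : Int), (0 : Int))] := by
    rcases List.mem_cons.mp hmem with e | h
    · simp [e]
    · exact List.mem_append.mpr (Or.inl h)
  have hdomc : ∀ p ∈ xs ++ [((0 : Int), (0 : Int))], p.1 ≤ r.1 ∧ (p.1 = r.1 → p.2 ≤ r.2) := by
    intro p hp
    rcases List.mem_append.mp hp with h | h
    · exact hdom p (List.mem_cons.mpr (Or.inr h))
    · rw [List.mem_singleton] at h
      subst h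
      exact hdom (0, 0) (List.mem_cons_self ..)
  have hW : PySem.List.max? ((xs ++ [((0 : Int), (0 : Int))]).map Prod.fst) (fun y => y)
      = some r.1 := by
    apply pv_max?_eq
    · exact List.mem_map.mpr ⟨r, hmemc, rfl⟩
    · intro y hy
      obtain ⟨p, hp, he⟩ := List.mem_map.mp hy
      exact he ▸ (hdomc p hp).1
  have hR : PySem.List.max?
      (((xs ++ [((0 : Int), (0 : Int))]).filter (fun p => p.1 = r.1)).map Prod.snd)
      (fun y => y) = some r.2 := by
    apply pv_max?_eq
    · exact List.mem_map.mpr ⟨r, List.mem_filter.mpr ⟨hmemc, by simp⟩, rfl⟩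
    · intro y hy
      obtain ⟨p, hp, he⟩ := List.mem_map.mp hy
      obtain ⟨hpc, hpe⟩ := List.mem_filter.mp hp
      exact he ▸ (hdomc p hpc).2 (by simpa using hpe)
  simp only [hW, Option.getD_some, hR]
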